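-- pv_equiv track=rewrite | github.com/omri1708/imu_prod | repo_snapshot/learning/pattern_store.py | _dominant
-- ===== SOURCE A (Python) =====
-- from typing import Dict, Any, List
--
-- def _dominant(spec:Dict[str,Any]) -> str:
--     types = [c.get("type","") for c in (spec.get("components") or [])]
--     if "realtime" in types: return "realtime"
--     if "game" in types:     return "game"
--     if "mobile" in types:   return "mobile"
--     if "web" in types:      return "web"
--     if "api" in types:      return "api"
--     return "custom"
-- ===== SOURCE B (Python) =====
-- def _dominant(spec):
--     rank = {"realtime": 0, "game": 1, "mobile": 2, "web": 3, "api": 4}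
--     order = ["realtime", "game", "mobile", "web", "api"]
--     best = len(order)
--     for c in (spec.get("components") or []):
--         r = rank.get(c.get("type", ""), len(order))
--         if r < best:
--             best = r
--     return order[best] if best < len(order) else "custom"
-- ===== Notes on version B (the rewrite author's own statement) =====
-- stated objective: alternative
-- what changed: Replaces the five-level membership cascade (each 'in' rescanning the whole types list) by a single pass over the components maintaining a running minimum priority rank, indexed into an ordered name list at the end.
import Mathlib
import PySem

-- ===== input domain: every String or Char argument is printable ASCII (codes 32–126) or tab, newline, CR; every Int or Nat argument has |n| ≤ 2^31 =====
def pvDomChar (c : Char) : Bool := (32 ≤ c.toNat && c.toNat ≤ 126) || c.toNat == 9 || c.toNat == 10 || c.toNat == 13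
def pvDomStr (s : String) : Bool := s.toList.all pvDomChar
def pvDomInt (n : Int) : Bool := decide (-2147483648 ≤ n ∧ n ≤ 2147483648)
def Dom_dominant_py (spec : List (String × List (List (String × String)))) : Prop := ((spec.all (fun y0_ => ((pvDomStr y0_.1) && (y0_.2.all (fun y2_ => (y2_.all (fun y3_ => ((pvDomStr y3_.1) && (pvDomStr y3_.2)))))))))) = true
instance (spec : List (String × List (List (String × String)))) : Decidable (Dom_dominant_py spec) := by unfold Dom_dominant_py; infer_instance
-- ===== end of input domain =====

-- ===== PORT A =====
-- B replaces A's five membership rescans of the types list by one running-minimum pass (objective: alternative).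
def dominant_py (spec : List (String × List (List (String × String)))) : String :=
  let types := (PySem.Dict.getD (PySem.Dict.mk spec) "components" []).map (fun c => PySem.Dict.getD (PySem.Dict.mk c) "type" "")
  if types.contains "realtime" then "realtime"
  else if types.contains "game" then "game"
  else if types.contains "mobile" then "mobile"
  else if types.contains "web" then "web"
  else if types.contains "api" then "api"
  else "custom"

-- ===== PORT B =====
def pvRank : PySem.Dict String Int :=
  PySem.Dict.mk [("realtime", 0), ("game", 1), ("mobile", 2), ("web", 3), ("api", 4)]
def pvOrder : List String := ["realtime", "game", "mobile", "web", "api"]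

def dominant_py_alt (spec : List (String × List (List (String × String)))) : String :=
  let best := (PySem.Dict.getD (PySem.Dict.mk spec) "components" []).foldl
    (fun best c =>
      let r := PySem.Dict.getD pvRank (PySem.Dict.getD (PySem.Dict.mk c) "type" "") 5
      if r < best then r else best) 5
  if best < 5 then (PySem.List.pyGet? pvOrder best).getD "custom" else "custom"

-- ===== PRECONDITION & SPEC =====
def Spec_dominant_py (spec : List (String × List (List (String × String)))) (out : String) : Prop := out = dominant_py_alt spec
instance (spec : List (String × List (List (String × String)))) (out : String) : Decidable (Spec_dominant_py spec out) := by unfold Spec_dominant_py; infer_instance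

-- ===== CLAIM (what is proved, stated in full; the proofs are below) =====
def Claim_equal_dominant_py : Prop := ∀ (spec : List (String × List (List (String × String)))), Dom_dominant_py spec → Spec_dominant_py spec (dominant_py spec)

-- ===== LEMMAS AND PROOFS =====

-- rank lookup as used by B's loop body
def pvRk (t : String) : Int := PySem.Dict.getD pvRank t 5

-- B's running minimum, started at b ≤ 5, equals A's priority cascade min-ed with b.
lemma pv_key (ts : List String) (b : Int) (hb5 : b ≤ 5) :
    ts.foldl (fun best t => if pvRk t < best then pvRk t else best) b
      = if ts.contains "realtime" then min b 0
        else if ts.contains "game" then min b 1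
        else if ts.contains "mobile" then min b 2
        else if ts.contains "web" then min b 3
        else if ts.contains "api" then min b 4
        else b := by
  induction ts generalizing b with
  | nil => simp
  | cons t ts ih =>
    by_cases h1 : t = "realtime"
    · subst h1
      have hrk : pvRk "realtime" = 0 := by decide
      have e0 : ("realtime" == "game") = false := by decide
      have e1 : ("mobile" == "realtime") = false := by decide
      have e2 : ("web" == "realtime") = false := by decide
      have e3 : ("api" == "realtime") = false := by decide
      simp only [List.foldl_cons, hrk]
      have hb' : (if (0:Int) < b then (0:Int) else b) ≤ 5 := by split_ifs <;> omega
      rw [ih _ hb']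
      simp only [List.contains_cons, beq_self_eq_true, Bool.true_or, e1, e2, e3,
        Bool.false_or, if_true]
      split_ifs
      all_goals omega
    · 
      by_cases h2 : t = "game"
      · subst h2
        have hrk : pvRk "game" = 1 := by decide
        have e0 : ("realtime" == "game") = false := by decide
        have e1 : ("game" == "mobile") = false := by decide
        have e2 : ("web" == "game") = false := by decide
        have e3 : ("api" == "game") = false := by decide
        simp only [List.foldl_cons, hrk]
        have hb' : (if (1:Int) < b then (1:Int) else b) ≤ 5 := by split_ifs <;> omega
        rw [ih _ hb']
        simp only [List.contains_cons, beq_self_eq_true, Bool.true_or, e0, e2, e3,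
          Bool.false_or, if_true]
        split_ifs
        all_goals omega
      · 
        by_cases h3 : t = "mobile"
        · subst h3
          have hrk : pvRk "mobile" = 2 := by decide
          have e0 : ("realtime" == "mobile") = false := by decide
          have e1 : ("game" == "mobile") = false := by decide
          have e2 : ("mobile" == "web") = false := by decide
          have e3 : ("api" == "mobile") = false := by decide
          simp only [List.foldl_cons, hrk]
          have hb' : (if (2:Int) < b then (2:Int) else b) ≤ 5 := by split_ifs <;> omega
          rw [ih _ hb']
          simp only [List.contains_cons, beq_self_eq_true, Bool.true_or, e0, e1, e3,
            Bool.false_or, if_true]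
          split_ifs
          all_goals omega
        · 
          by_cases h4 : t = "web"
          · subst h4
            have hrk : pvRk "web" = 3 := by decide
            have e0 : ("realtime" == "web") = false := by decide
            have e1 : ("game" == "web") = false := by decide
            have e2 : ("mobile" == "web") = false := by decide
            have e3 : ("web" == "api") = false := by decide
            simp only [List.foldl_cons, hrk]
            have hb' : (if (3:Int) < b then (3:Int) else b) ≤ 5 := by split_ifs <;> omega
            rw [ih _ hb']
            simp only [List.contains_cons, beq_self_eq_true, Bool.true_or, e0, e1, e2,
              Bool.false_or, if_true]
            split_ifs
            all_goals omega
          · 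
            by_cases h5 : t = "api"
            · subst h5
              have hrk : pvRk "api" = 4 := by decide
              have e0 : ("realtime" == "api") = false := by decide
              have e1 : ("game" == "api") = false := by decide
              have e2 : ("mobile" == "api") = false := by decide
              have e3 : ("web" == "api") = false := by decide
              simp only [List.foldl_cons, hrk]
              have hb' : (if (4:Int) < b then (4:Int) else b) ≤ 5 := by split_ifs <;> omega
              rw [ih _ hb']
              simp only [List.contains_cons, beq_self_eq_true, Bool.true_or, e0, e1, e2, e3,
                Bool.false_or, if_true]
              split_ifs
              all_goals omega
            · have hb : ("realtime" == t) = false := by simp [beq_eq_false_iff_ne]; exact Ne.symm h1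
              have hg : ("game" == t) = false := by simp [beq_eq_false_iff_ne]; exact Ne.symm h2
              have hm : ("mobile" == t) = false := by simp [beq_eq_false_iff_ne]; exact Ne.symm h3
              have hw : ("web" == t) = false := by simp [beq_eq_false_iff_ne]; exact Ne.symm h4
              have ha : ("api" == t) = false := by simp [beq_eq_false_iff_ne]; exact Ne.symm h5
              have hr : pvRk t = 5 := by
                simp [pvRk, pvRank, PySem.Dict.getD, PySem.Dict.get?, hb, hg, hm, hw, ha]
              have hid : (if pvRk t < b then pvRk t else b) = b := by rw [hr]; split_ifs <;> omega
              simp only [List.foldl_cons, hid]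
              rw [ih _ hb5]
              simp only [List.contains_cons, hb, hg, hm, hw, ha, Bool.false_or]

-- B's component fold equals the string fold over the extracted types.
lemma pv_fold_eq (comps : List (List (String × String))) (b : Int) :
    comps.foldl
      (fun best c =>
        let r := PySem.Dict.getD pvRank (PySem.Dict.getD (PySem.Dict.mk c) "type" "") 5
        if r < best then r else best) b
      = (comps.map (fun c => PySem.Dict.getD (PySem.Dict.mk c) "type" "")).foldl
          (fun best t => if pvRk t < best then pvRk t else best) b := by
  induction comps generalizing b with
  | nil => rfl
  | cons c cs ih => simp only [List.foldl_cons, List.map_cons]; exact ih _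

-- ===== VERDICT (by name: the statement is the Claim_ definition above) =====
theorem dominant_py_spec : Claim_equal_dominant_py := by
  intro spec _
  unfold Spec_dominant_py dominant_py dominant_py_alt
  simp only [pv_fold_eq]
  rw [pv_key _ _ (by omega)]
  split_ifs <;> first | decide | (exfalso; omega)
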